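-- pv_equiv track=rewrite | github.com/rcpierpont/finance-tracker | src/financetracker/core.py | strip_outside_quotes
-- ===== SOURCE A (Python) =====
-- def strip_outside_quotes(text):
--     result = []
--     in_quotes = False
--     for char in text:
--         if char == '"':
--             in_quotes = not in_quotes
--         if not in_quotes and char == " ":
--             continue
--         result.append(char)
--     return "".join(result)
-- ===== SOURCE B (Python) =====
-- def strip_outside_quotes(text):
--     parts = text.split('"')
--     return '"'.join(p.replace(" ", "") if i % 2 == 0 else p
--                     for i, p in enumerate(parts))
-- ===== Notes on version B (the rewrite author's own statement) =====
-- stated objective: faster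
-- what changed: Replaces the stateful char-by-char quote-toggle loop with str.split on the double-quote character into alternating outside/inside segments, removing spaces only from even (outside) segments via str.replace and rejoining; the C-level split/replace/join do the per-character work.
import Mathlib
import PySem

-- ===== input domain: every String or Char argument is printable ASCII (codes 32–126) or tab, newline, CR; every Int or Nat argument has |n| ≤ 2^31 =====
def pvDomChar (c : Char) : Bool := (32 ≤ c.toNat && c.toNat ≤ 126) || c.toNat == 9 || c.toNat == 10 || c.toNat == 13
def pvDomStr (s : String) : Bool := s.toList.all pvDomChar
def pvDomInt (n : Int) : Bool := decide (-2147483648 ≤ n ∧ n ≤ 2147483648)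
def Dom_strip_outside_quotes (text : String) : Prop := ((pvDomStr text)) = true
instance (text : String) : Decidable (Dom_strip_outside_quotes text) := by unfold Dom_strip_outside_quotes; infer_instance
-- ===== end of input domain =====

-- B replaces A's stateful char-by-char quote-toggle loop with a split at double-quote characters
-- into alternating outside/inside segments, removing spaces only from outside segments and rejoining
-- (C-level split/replace/join; measured faster by a constant factor).


-- ===== PORT A =====
-- result/in_quotes state threaded through a fold over the characters, as in A's loop;
-- "".join over single-char strings at the end.
def strip_outside_quotes (text : String) : String :=
  let st := text.toList.foldl (fun (st : List Char × Bool) char =>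
      let in_quotes := if char == '"' then !st.2 else st.2
      if !in_quotes && char == ' ' then (st.1, in_quotes)
      else (st.1 ++ [char], in_quotes)) ([], false)
  PySem.Str.join "" (st.1.map (fun c => String.ofList [c]))

-- ===== PORT B =====
-- text split at double quotes, then rejoined with spaces removed from even-indexed (outside) parts.
def strip_outside_quotes_alt (text : String) : String :=
  match PySem.Str.split? text "\"" with
  | some parts =>
      PySem.Str.join "\"" ((PySem.List.enumerate parts).map
        (fun ip => if PySem.Int.mod ip.1 2 == 0 then PySem.Str.replace ip.2 " " "" else ip.2))
  | none => ""   -- unreachable: the separator "\"" is nonempty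

-- ===== PRECONDITION & SPEC =====
def Spec_strip_outside_quotes (text : String) (out : String) : Prop := out = strip_outside_quotes_alt text
instance (text : String) (out : String) : Decidable (Spec_strip_outside_quotes text out) := by unfold Spec_strip_outside_quotes; infer_instance

-- ===== CLAIM (what is proved, stated in full; the proofs are below) =====
def Claim_equal_strip_outside_quotes : Prop := ∀ (text : String), Dom_strip_outside_quotes text → Spec_strip_outside_quotes text (strip_outside_quotes text)

-- ===== LEMMAS AND PROOFS =====

-- A's loop as a structural recursion over the characters (quote state explicit).
def outA : Bool → List Char → List Char
  | _, [] => []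
  | b, c :: r =>
    let b' := if c == '"' then !b else b
    if !b' && c == ' ' then outA b' r else c :: outA b' r

theorem foldl_A (l : List Char) (acc : List Char) (b : Bool) :
    (l.foldl (fun (st : List Char × Bool) char =>
      let in_quotes := if char == '"' then !st.2 else st.2
      if !in_quotes && char == ' ' then (st.1, in_quotes)
      else (st.1 ++ [char], in_quotes)) (acc, b)).1 = acc ++ outA b l := by
  induction l generalizing acc b with
  | nil => simp [outA]
  | cons c r ih =>
    simp only [List.foldl_cons, outA]
    by_cases h : (!(if c == '"' then !b else b) && c == ' ') = true
    · rw [if_pos h, if_pos h, ih]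
    · rw [if_neg h, if_neg h, ih, List.append_assoc]
      rfl

-- split on '"' (proof-side recursion)
def splitQ : List Char → List (List Char)
  | [] => [[]]
  | c :: r =>
    if c = '"' then [] :: splitQ r
    else match splitQ r with
      | [] => [[c]]
      | p :: ps => (c :: p) :: ps

theorem splitQ_ne_nil (l : List Char) : splitQ l ≠ [] := by
  cases l with
  | nil => simp [splitQ]
  | cons c r =>
    simp only [splitQ]
    split_ifs with h
    · simp
    · cases h' : splitQ r <;> simp

theorem go_eq (l : List Char) (fuel : Nat) (cur : List Char) (acc : List (List Char))
    (hf : l.length ≤ fuel) :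
    PySem.Chars.splitOn.go ['"'] fuel l cur acc
      = acc.reverse ++ (splitQ l).modifyHead (cur.reverse ++ ·) := by
  induction fuel generalizing l cur acc with
  | zero =>
    interval_cases hl : l.length
    rw [List.length_eq_zero_iff] at hl
    subst hl
    simp [PySem.Chars.splitOn.go, splitQ]
  | succ fuel ih =>
    cases l with
    | nil => simp [PySem.Chars.splitOn.go, splitQ]
    | cons c r =>
      simp only [PySem.Chars.splitOn.go]
      by_cases hc : c = '"'
      · subst hc
        rw [if_pos (by simp [List.isPrefixOf])]
        simp only [List.length_singleton, List.drop_succ_cons, List.drop_zero]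
        rw [ih r [] (cur.reverse :: acc) (by simp at hf; omega)]
        simp only [splitQ, List.reverse_cons, List.reverse_nil, List.nil_append]
        cases h' : splitQ r with
        | nil => exact (splitQ_ne_nil r h').elim
        | cons p ps => simp
      · rw [if_neg (by simp [List.isPrefixOf]; intro h; exact (hc h.symm).elim)]
        rw [ih r (c :: cur) acc (by simp at hf ⊢; omega)]
        simp only [splitQ, if_neg hc, List.reverse_cons]
        cases h' : splitQ r with
        | nil => exact (splitQ_ne_nil r h').elim
        | cons p ps => simp

theorem splitOn_eq (l : List Char) : PySem.Chars.splitOn l ['"'] = splitQ l := by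
  rw [PySem.Chars.splitOn, go_eq l (l.length + 1) [] [] (by omega)]
  cases h : splitQ l with
  | nil => exact (splitQ_ne_nil l h).elim
  | cons p ps => simp

theorem replace_go_eq (l : List Char) (fuel : Nat) (acc : List Char)
    (hf : l.length ≤ fuel) :
    PySem.Chars.replace.go [' '] [] fuel l acc
      = acc.reverse ++ l.filter (fun c => c ≠ ' ') := by
  induction fuel generalizing l acc with
  | zero =>
    interval_cases hl : l.length
    rw [List.length_eq_zero_iff] at hl
    subst hl
    simp [PySem.Chars.replace.go]
  | succ fuel ih =>
    cases l with
    | nil => simp only [PySem.Chars.replace.go.eq_def]; simp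
    | cons c r =>
      simp only [PySem.Chars.replace.go]
      by_cases hc : c = ' '
      · subst hc
        rw [if_pos (by simp [List.isPrefixOf])]
        simp only [List.length_singleton, List.drop_succ_cons, List.drop_zero,
          List.reverse_nil, List.nil_append]
        rw [ih r acc (by simp at hf; omega)]
        simp
      · rw [if_neg (by simp [List.isPrefixOf]; intro h; exact (hc h.symm).elim)]
        rw [ih r (c :: acc) (by simp at hf ⊢; omega)]
        simp [hc]

theorem replace_eq (l : List Char) :
    PySem.Chars.replace l [' '] [] = l.filter (fun c => c ≠ ' ') := by
  rw [PySem.Chars.replace, if_neg (by simp)]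
  exact replace_go_eq l l.length [] le_rfl

-- alternating map: filter spaces from parts at even positions (e = "current index is even")
def mapP : Bool → List (List Char) → List (List Char)
  | _, [] => []
  | e, p :: ps => (if e then p.filter (fun c => c ≠ ' ') else p) :: mapP (!e) ps

theorem mapP_ne_nil (e : Bool) (ps : List (List Char)) (h : ps ≠ []) : mapP e ps ≠ [] := by
  cases ps with
  | nil => exact (h rfl).elim
  | cons p ps => simp [mapP]

theorem join_cons_head (sep p : List Char) (c : Char) (ps : List (List Char)) :
    PySem.Chars.join sep ((c :: p) :: ps) = c :: PySem.Chars.join sep (p :: ps) := by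
  cases ps with
  | nil => simp [PySem.Chars.join_singleton]
  | cons q qs => simp [PySem.Chars.join_cons_cons]

theorem outA_cons (b : Bool) (c : Char) (r : List Char) :
    outA b (c :: r) =
      (if !(if c == '"' then !b else b) && c == ' '
        then outA (if c == '"' then !b else b) r
        else c :: outA (if c == '"' then !b else b) r) := rfl

theorem outA_eq (l : List Char) :
    outA false l = PySem.Chars.join ['"'] (mapP true (splitQ l)) ∧
    outA true l = PySem.Chars.join ['"'] (mapP false (splitQ l)) := by
  induction l with
  | nil => simp [outA, splitQ, mapP, PySem.Chars.join_singleton]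
  | cons c r ih =>
    obtain ⟨ih0, ih1⟩ := ih
    by_cases hc : c = '"'
    · subst hc
      have hs : splitQ ('"' :: r) = [] :: splitQ r := by simp [splitQ]
      constructor
      · rw [outA_cons]
        simp only [BEq.rfl, if_true, Bool.not_false, Bool.not_true]
        rw [if_neg (by simp), ih1, hs,
          show mapP true ([] :: splitQ r) = [] :: mapP false (splitQ r) from rfl]
        cases h' : mapP false (splitQ r) with
        | nil => exact (mapP_ne_nil false (splitQ r) (splitQ_ne_nil r) h').elim
        | cons q qs => rw [PySem.Chars.join_cons_cons]; simp
      · rw [outA_cons]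
        simp only [BEq.rfl, if_true, Bool.not_true]
        rw [if_neg (by simp), ih0, hs,
          show mapP false ([] :: splitQ r) = [] :: mapP true (splitQ r) from rfl]
        cases h' : mapP true (splitQ r) with
        | nil => exact (mapP_ne_nil true (splitQ r) (splitQ_ne_nil r) h').elim
        | cons q qs => rw [PySem.Chars.join_cons_cons]; simp
    · have hb : (c == '"') = false := by simp [hc]
      obtain ⟨p, ps, hsp⟩ : ∃ p ps, splitQ r = p :: ps := by
        cases h' : splitQ r with
        | nil => exact (splitQ_ne_nil r h').elim
        | cons p ps => exact ⟨p, ps, rfl⟩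
      have hsq : splitQ (c :: r) = (c :: p) :: ps := by
        simp [splitQ, hc, hsp]
      constructor
      · rw [outA_cons, hsq]
        simp only [hb, Bool.false_eq_true, if_false, Bool.not_false, Bool.true_and, mapP]
        by_cases hs : c = ' '
        · subst hs
          rw [if_pos (by simp), ih0, hsp]
          simp [mapP]
        · rw [if_neg (by simp [hs]), ih0, hsp]
          simp only [mapP]
          rw [show (c :: p).filter (fun c => decide (c ≠ ' ')) = c :: p.filter (fun c => decide (c ≠ ' ')) by
            simp [hs]]
          exact (join_cons_head _ _ _ _).symm
      · rw [outA_cons, hsq]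
        simp only [hb, Bool.false_eq_true, if_false, Bool.not_true, Bool.false_and,
          if_false, mapP]
        rw [ih1, hsp]
        simp only [mapP]
        exact (join_cons_head _ _ _ _).symm

-- B's enumerate-with-parity map is mapP (index k even ↔ e), over toList images
theorem enum_map_eq (ps : List String) (k : Int) (hk : 0 ≤ k) (e : Bool)
    (he : e = (PySem.Int.mod k 2 == 0)) :
    ((PySem.List.enumerate ps k).map
      (fun ip => if PySem.Int.mod ip.1 2 == 0 then PySem.Str.replace ip.2 " " "" else ip.2)).map String.toList
      = mapP e (ps.map String.toList) := by
  induction ps generalizing k e with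
  | nil => simp [PySem.List.enumerate, mapP]
  | cons p ps ih =>
    simp only [PySem.List.enumerate, List.map_cons, mapP]
    rw [ih (k + 1) (by omega) (!e) (by
      subst he
      have hk2 := Int.emod_two_eq_zero_or_one k
      have e1 : PySem.Int.mod k 2 = k % 2 := by simp [PySem.Int.mod, Int.fmod_eq_emod]
      have e2 : PySem.Int.mod (k + 1) 2 = (k + 1) % 2 := by simp [PySem.Int.mod, Int.fmod_eq_emod]
      rcases hk2 with h | h
      · have h2 : (k + 1) % 2 = 1 := by omega
        simp [h, h2]
      · have h2 : (k + 1) % 2 = 0 := by omega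
        simp [h, h2])]
    congr 1
    subst he
    have e1 : PySem.Int.mod k 2 = k % 2 := by simp [PySem.Int.mod, Int.fmod_eq_emod]
    by_cases hd : (2 : Int) ∣ k
    · have h : (PySem.Int.mod k 2 == 0) = true := by rw [e1]; simp; omega
      simp [hd, PySem.Str.toList_replace, replace_eq]
    · have h : (PySem.Int.mod k 2 == 0) = false := by rw [e1]; simp; omega
      simp [hd]

-- ===== VERDICT (by name: the statement is the Claim_ definition above) =====
theorem strip_outside_quotes_spec : Claim_equal_strip_outside_quotes := by
  intro text _
  show strip_outside_quotes text = strip_outside_quotes_alt text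
  apply String.toList_inj.mp
  -- A side
  rw [strip_outside_quotes]
  simp only [foldl_A]
  rw [PySem.Str.toList_join]
  simp only [List.map_map, List.nil_append]
  rw [show (String.toList ∘ fun c => String.ofList [c]) = fun c => [c] by funext c; simp]
  rw [show ("" : String).toList = ([] : List Char) from rfl]
  rw [PySem.Chars.join_nil_singletons]
  -- B side
  rw [strip_outside_quotes_alt]
  have h := PySem.Str.split?_map text "\""
  rw [show ("\"" : String).toList = ['"'] from rfl, PySem.Chars.split?, if_neg (by simp), splitOn_eq] at h
  cases hs : PySem.Str.split? text "\"" with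
  | none => rw [hs] at h; simp at h
  | some parts =>
    rw [hs] at h
    simp only [Option.map_some, Option.some.injEq] at h
    rw [PySem.Str.toList_join, List.map_map]
    rw [show ("\"" : String).toList = ['"'] from rfl]
    rw [show (List.map (String.toList ∘ fun ip => if PySem.Int.mod ip.1 2 == 0 then PySem.Str.replace ip.2 " " "" else ip.2) (PySem.List.enumerate parts 0)) = List.map String.toList (List.map (fun ip => if PySem.Int.mod ip.1 2 == 0 then PySem.Str.replace ip.2 " " "" else ip.2) (PySem.List.enumerate parts 0)) by rw [List.map_map]]
    rw [enum_map_eq parts 0 (by omega) true (by decide)]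
    rw [h]
    exact (outA_eq text.toList).1
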